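-- pv_equiv track=rewrite | github.com/CalebMathers/advent-of-code | 2015/day_5.py | check_new_nice_string
-- ===== SOURCE A (Python) =====
-- def check_new_nice_string(string_to_check: str) -> bool:
--     """Returns true if the string is 'nice' according to
--     new standards, else returns false."""
--     repeat_gap_count = 0
--     pairs = []
--
--     for i, char in enumerate(string_to_check):
--         if i != len(string_to_check) - 1:
--             pairs.append(char + string_to_check[i+1])
--
--             if i != len(string_to_check) - 2:
--                 if char == string_to_check[i+2]:
--                     repeat_gap_count += 1
--
--     repeating_pair_count = 0
--
--     for pair in pairs:
--         if string_to_check.count(pair) > 1: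
--             repeating_pair_count += 1
--
--     if repeat_gap_count >= 1 and repeating_pair_count >= 1:
--         return True
--
--     return False
-- ===== SOURCE B (Python) =====
-- def check_new_nice_string(string_to_check: str) -> bool:
--     """One-pass rewrite: scan once, remembering in a set every pair that
--     ended at least two positions back, instead of rescanning with str.count."""
--     n = len(string_to_check)
--     seen = set()
--     has_gap = False
--     has_pair = False
--     for i in range(n - 1):
--         if i >= 2:
--             seen.add(string_to_check[i - 2:i])
--         if string_to_check[i:i + 2] in seen:
--             has_pair = True
--         if i + 2 < n and string_to_check[i] == string_to_check[i + 2]: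
--             has_gap = True
--     return has_gap and has_pair
-- ===== Notes on version B (the rewrite author's own statement) =====
-- stated objective: faster
-- what changed: Replaces A's pairs list plus a quadratic pass of str.count rescans with a single left-to-right scan that keeps a set of all pairs ending at least two positions back, so the non-overlapping repeated-pair test becomes one O(1) set lookup per position.
import Mathlib
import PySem

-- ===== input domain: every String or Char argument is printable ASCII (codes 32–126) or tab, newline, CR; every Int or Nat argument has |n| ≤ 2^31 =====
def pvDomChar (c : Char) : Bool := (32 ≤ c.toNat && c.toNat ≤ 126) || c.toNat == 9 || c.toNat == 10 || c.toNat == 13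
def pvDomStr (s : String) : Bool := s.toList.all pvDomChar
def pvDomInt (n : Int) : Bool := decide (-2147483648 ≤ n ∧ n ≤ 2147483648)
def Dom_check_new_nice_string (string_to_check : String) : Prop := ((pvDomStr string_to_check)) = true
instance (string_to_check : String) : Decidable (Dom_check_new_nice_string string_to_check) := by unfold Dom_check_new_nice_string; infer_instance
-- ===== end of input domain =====

-- B replaces A's quadratic str.count rescans by one pass with a set of earlier pairs (objective: faster).

-- ===== PORT A =====
def check_new_nice_string (string_to_check : String) : Bool :=
  let cs := string_to_check.toList
  let n : Int := (cs.length : Int)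
  -- first loop: for i, char in enumerate(string_to_check): accumulate (repeat_gap_count, pairs)
  let st := (PySem.List.enumerate cs).foldl
    (fun (st : Int × List (List Char)) ic =>
      if ic.1 ≠ n - 1 then
        let pairs := st.2 ++ [[ic.2, PySem.List.pyGetD cs (ic.1 + 1) ' ']]
        if ic.1 ≠ n - 2 then
          if ic.2 = PySem.List.pyGetD cs (ic.1 + 2) ' ' then (st.1 + 1, pairs)
          else (st.1, pairs)
        else (st.1, pairs)
      else st) ((0 : Int), ([] : List (List Char)))
  -- second loop: for pair in pairs: if string_to_check.count(pair) > 1: repeating_pair_count += 1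
  let repeating_pair_count : Int := st.2.foldl
    (fun acc pair => if PySem.Chars.count cs pair > 1 then acc + 1 else acc) 0
  if st.1 ≥ 1 ∧ repeating_pair_count ≥ 1 then true else false

-- ===== PORT B =====
def check_new_nice_string_alt (string_to_check : String) : Bool :=
  let cs := string_to_check.toList
  let n : Int := (cs.length : Int)
  let st := (PySem.List.pyRange 0 (n - 1)).foldl
    (fun (st : PySem.Set (List Char) × Bool × Bool) i =>
      let seen := if i ≥ 2 then st.1.add (PySem.List.slice cs (some (i - 2)) (some i)) else st.1
      let has_pair := st.2.2 || seen.contains (PySem.List.slice cs (some i) (some (i + 2)))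
      let has_gap := st.2.1 || (decide (i + 2 < n) && (PySem.List.pyGetD cs i ' ' == PySem.List.pyGetD cs (i + 2) ' '))
      (seen, has_gap, has_pair)) (PySem.Set.empty, false, false)
  st.2.1 && st.2.2

-- ===== PRECONDITION & SPEC =====
def Spec_check_new_nice_string (string_to_check : String) (out : Bool) : Prop := out = check_new_nice_string_alt string_to_check
instance (string_to_check : String) (out : Bool) : Decidable (Spec_check_new_nice_string string_to_check out) := by unfold Spec_check_new_nice_string; infer_instance

-- ===== CLAIM (what is proved, stated in full; the proofs are below) =====
def Claim_equal_check_new_nice_string : Prop := ∀ (string_to_check : String), Dom_check_new_nice_string string_to_check → Spec_check_new_nice_string string_to_check (check_new_nice_string string_to_check)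

-- ===== LEMMAS AND PROOFS =====

def gcount (sub : List Char) : List Char → Nat
  | [] => 0
  | h :: t => if sub.isPrefixOf (h :: t) then gcount sub (t.drop (sub.length - 1)) + 1 else gcount sub t
  termination_by l => l.length
  decreasing_by
  · simp
  · simp

theorem go_eq_gcount (p : List Char) (hp : p ≠ []) :
    ∀ (fuel : Nat) (l : List Char) (acc : Nat), l.length ≤ fuel →
      PySem.Chars.count.go p fuel l acc = acc + gcount p l := by
  intro fuel
  induction fuel with
  | zero =>
    intro l acc hl
    have : l = [] := List.eq_nil_of_length_eq_zero (Nat.le_zero.mp hl)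
    subst this
    rw [PySem.Chars.count.go.eq_def]
    simp [gcount]
  | succ fuel ih =>
    intro l acc hl
    cases l with
    | nil => rw [PySem.Chars.count.go.eq_def]; simp [gcount]
    | cons h t =>
      rw [PySem.Chars.count.go.eq_def]
      simp only []
      by_cases hpre : p.isPrefixOf (h :: t)
      · rw [if_pos hpre]
        obtain ⟨q, qs, rfl⟩ : ∃ q qs, p = q :: qs := by
          cases p with
          | nil => exact absurd rfl hp
          | cons q qs => exact ⟨q, qs, rfl⟩
        have hdrop : List.drop (q :: qs).length (h :: t) = t.drop ((q :: qs).length - 1) := by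
          simp
        rw [ih _ (acc + 1) (by simp at hl ⊢; omega), hdrop]
        rw [gcount]
        rw [if_pos hpre]
        omega
      · rw [if_neg hpre]
        rw [ih _ acc (by simp at hl; omega)]
        conv_rhs => rw [gcount]
        rw [if_neg hpre]

theorem count_eq_gcount (cs p : List Char) (hp : p ≠ []) :
    PySem.Chars.count cs p = gcount p cs := by
  unfold PySem.Chars.count
  rw [if_neg (by simp [List.isEmpty_iff, hp])]
  simpa using go_eq_gcount p hp cs.length cs 0 le_rfl

theorem drop_shift (p : List Char) (h : Char) (t : List Char) :
    (∃ c : Nat, p <+: (h :: t).drop c) ↔ p <+: (h :: t) ∨ ∃ c : Nat, p <+: t.drop c := by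
  constructor
  · rintro ⟨c, hc⟩
    cases c with
    | zero => exact Or.inl (by simpa using hc)
    | succ c => exact Or.inr ⟨c, by simpa using hc⟩
  · rintro (hc | ⟨c, hc⟩)
    · exact ⟨0, by simpa using hc⟩
    · exact ⟨c + 1, by simpa using hc⟩

theorem gcount_one_iff (p : List Char) (hp : p ≠ []) (l : List Char) :
    1 ≤ gcount p l ↔ ∃ c : Nat, p <+: l.drop c := by
  induction l using gcount.induct p with
  | case1 =>
    rw [gcount]
    constructor
    · omega
    · rintro ⟨c, hc⟩
      simp only [List.drop_nil] at hc
      exact absurd (List.prefix_nil.mp hc) hp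
  | case2 h t hpre ih =>
    rw [gcount, if_pos hpre]
    simp only [Nat.le_add_left, true_iff]
    exact ⟨0, by simpa using List.isPrefixOf_iff_prefix.mp hpre⟩
  | case3 h t hpre ih =>
    rw [gcount, if_neg hpre]
    rw [ih, drop_shift p]
    simp [List.isPrefixOf_iff_prefix] at hpre
    tauto

theorem drop_len_cons (p : List Char) (hp : p ≠ []) (h : Char) (t : List Char) :
    t.drop (p.length - 1) = (h :: t).drop p.length := by
  cases p with
  | nil => exact absurd rfl hp
  | cons q qs => simp

theorem gcount_two_iff (p : List Char) (hp : p ≠ []) (l : List Char) :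
    2 ≤ gcount p l ↔ ∃ a b : Nat, a + p.length ≤ b ∧ p <+: l.drop a ∧ p <+: l.drop b := by
  induction l using gcount.induct p with
  | case1 =>
    rw [gcount]
    constructor
    · omega
    · rintro ⟨a, b, _, _, hb⟩
      simp only [List.drop_nil] at hb
      exact absurd (List.prefix_nil.mp hb) hp
  | case2 h t hpre ih =>
    rw [gcount, if_pos hpre]
    rw [show (2 : Nat) ≤ gcount p (t.drop (p.length - 1)) + 1 ↔ 1 ≤ gcount p (t.drop (p.length - 1)) by omega]
    rw [gcount_one_iff p hp, drop_len_cons p hp h t]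
    constructor
    · rintro ⟨c, hc⟩
      refine ⟨0, p.length + c, by omega, by simpa using List.isPrefixOf_iff_prefix.mp hpre, ?_⟩
      rwa [List.drop_drop] at hc
    · rintro ⟨a, b, hab, ha, hb⟩
      refine ⟨b - p.length, ?_⟩
      rw [List.drop_drop, show p.length + (b - p.length) = b by omega]
      exact hb
  | case3 h t hpre ih =>
    rw [gcount, if_neg hpre]
    rw [ih]
    have hnp : ¬ p <+: (h :: t) := fun hc => hpre (List.isPrefixOf_iff_prefix.mpr hc)
    have hlen : 1 ≤ p.length := by have := List.length_pos_iff.mpr hp; omega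
    constructor
    · rintro ⟨a, b, hab, ha, hb⟩
      exact ⟨a + 1, b + 1, by omega, by simpa using ha, by simpa using hb⟩
    · rintro ⟨a, b, hab, ha, hb⟩
      cases a with
      | zero => exact absurd (by simpa using ha) hnp
      | succ a =>
        cases b with
        | zero => omega
        | succ b => exact ⟨a, b, by omega, by simpa using ha, by simpa using hb⟩

def pairAt (cs : List Char) (a : Nat) : List Char := (cs.drop a).take 2

theorem pairAt_eq (cs : List Char) (a : Nat) (h : a + 2 ≤ cs.length) :
    pairAt cs a = [cs.getD a ' ', cs.getD (a + 1) ' '] := by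
  unfold pairAt
  rw [List.drop_eq_getElem_cons (by omega), List.drop_eq_getElem_cons (by omega)]
  simp only [List.take_succ_cons, List.take_zero]
  rw [List.getD_eq_getElem cs ' ' (by omega), List.getD_eq_getElem cs ' ' (by omega)]

theorem pairAt_length (cs : List Char) (a : Nat) (h : a + 2 ≤ cs.length) :
    (pairAt cs a).length = 2 := by
  unfold pairAt
  simp
  omega

theorem mem_enumerate_iff {α : Type} (d : α) (cs : List α) (s : Int) (x : Int × α) :
    x ∈ PySem.List.enumerate cs s ↔ ∃ k : Nat, k < cs.length ∧ x = (s + k, cs.getD k d) := by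
  induction cs generalizing s with
  | nil => simp [PySem.List.enumerate_nil]
  | cons h t ih =>
    rw [PySem.List.enumerate_cons]
    simp only [List.mem_cons, ih]
    constructor
    · rintro (rfl | ⟨k, hk, rfl⟩)
      · exact ⟨0, by simp⟩
      · exact ⟨k + 1, by simpa using hk, by push_cast; simp [add_assoc]; ring_nf⟩
    · rintro ⟨k, hk, rfl⟩
      cases k with
      | zero => left; simp
      | succ k => right; exact ⟨k, by simp at hk; omega, by push_cast; simp; ring_nf⟩

-- "some character repeats with a gap of one"
def GapP (cs : List Char) : Prop := ∃ i : Nat, i + 3 ≤ cs.length ∧ cs.getD i ' ' = cs.getD (i + 2) ' '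

-- "some length-2 block occurs twice without overlapping"
def PairP (cs : List Char) : Prop :=
  ∃ (p : List Char) (a b : Nat), p.length = 2 ∧ a + 2 ≤ b ∧ p <+: cs.drop a ∧ p <+: cs.drop b

theorem A_fold_body (cs : List Char) (n : Int) :
    (fun (st : Int × List (List Char)) (ic : Int × Char) =>
      if ic.1 ≠ n - 1 then
        let pairs := st.2 ++ [[ic.2, PySem.List.pyGetD cs (ic.1 + 1) ' ']]
        if ic.1 ≠ n - 2 then
          if ic.2 = PySem.List.pyGetD cs (ic.1 + 2) ' ' then (st.1 + 1, pairs)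
          else (st.1, pairs)
        else (st.1, pairs)
      else st)
    = (fun st ic =>
        ((fun (r : Int) (ic : Int × Char) =>
            if ((ic.1 != n - 1) && (ic.1 != n - 2) && (ic.2 == PySem.List.pyGetD cs (ic.1 + 2) ' ')) = true
            then r + 1 else r) st.1 ic,
         (fun (p : List (List Char)) (ic : Int × Char) =>
            if (ic.1 != n - 1) = true
            then p ++ [[ic.2, PySem.List.pyGetD cs (ic.1 + 1) ' ']] else p) st.2 ic)) := by
  funext st ic
  by_cases h1 : ic.1 = n - 1 <;> by_cases h2 : ic.1 = n - 2 <;>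
    by_cases h3 : ic.2 = PySem.List.pyGetD cs (ic.1 + 2) ' ' <;>
    simp [h1, h2, h3]

theorem ite_tf_eq_true (P : Prop) [Decidable P] : ((if P then true else false) = true ↔ P) := by
  split_ifs with h <;> simp [h]

theorem gapCount_iff (cs : List Char) :
    0 < List.countP
        (fun ic => ic.1 != (cs.length : Int) - 1 && ic.1 != (cs.length : Int) - 2 &&
          ic.2 == PySem.List.pyGetD cs (ic.1 + 2) ' ')
        (PySem.List.enumerate cs) ↔ GapP cs := by
  rw [List.countP_pos_iff]
  constructor
  · rintro ⟨x, hx, hpx⟩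
    rw [mem_enumerate_iff ' '] at hx
    obtain ⟨k, hk, rfl⟩ := hx
    simp only [Bool.and_eq_true, bne_iff_ne, beq_iff_eq] at hpx
    obtain ⟨⟨h1, h2⟩, h3⟩ := hpx
    rw [show (0 : Int) + (k : Int) + 2 = ((k + 2 : Nat) : Int) by push_cast; ring,
      PySem.List.pyGetD_natCast] at h3
    exact ⟨k, by omega, h3⟩
  · rintro ⟨i, hi, heq⟩
    refine ⟨((0 : Int) + (i : Int), cs.getD i ' '), ?_, ?_⟩
    · rw [mem_enumerate_iff ' ']
      exact ⟨i, by omega, rfl⟩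
    · simp only [Bool.and_eq_true, bne_iff_ne, beq_iff_eq]
      refine ⟨⟨by omega, by omega⟩, ?_⟩
      rw [show (0 : Int) + (i : Int) + 2 = ((i + 2 : Nat) : Int) by push_cast; ring,
        PySem.List.pyGetD_natCast]
      exact heq

theorem pairCount_iff (cs : List Char) :
    0 < List.countP (fun q => decide (PySem.Chars.count cs q > 1))
        (List.map (fun ic => [ic.2, PySem.List.pyGetD cs (ic.1 + 1) ' '])
          (List.filter (fun ic => ic.1 != (cs.length : Int) - 1) (PySem.List.enumerate cs))) ↔
      PairP cs := by
  rw [List.countP_pos_iff]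
  constructor
  · rintro ⟨q, hq, hcnt⟩
    rw [List.mem_map] at hq
    obtain ⟨ic, hic, rfl⟩ := hq
    rw [List.mem_filter] at hic
    obtain ⟨hmem, hpred⟩ := hic
    rw [mem_enumerate_iff ' '] at hmem
    obtain ⟨k, hk, rfl⟩ := hmem
    simp only [bne_iff_ne] at hpred
    have hk2 : k + 2 ≤ cs.length := by omega
    have hq_eq : [((0 : Int) + (k : Int), cs.getD k ' ').2,
        PySem.List.pyGetD cs (((0 : Int) + (k : Int), cs.getD k ' ').1 + 1) ' '] = pairAt cs k := by
      rw [pairAt_eq cs k hk2]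
      simp only []
      rw [show (0 : Int) + (k : Int) + 1 = ((k + 1 : Nat) : Int) by push_cast; ring,
        PySem.List.pyGetD_natCast]
    rw [hq_eq] at hcnt
    have hlen := pairAt_length cs k hk2
    have hne : pairAt cs k ≠ [] := by intro h; rw [h] at hlen; simp at hlen
    rw [decide_eq_true_eq, count_eq_gcount cs _ hne] at hcnt
    have := (gcount_two_iff _ hne cs).mp (by omega)
    obtain ⟨a, b, hab, ha, hb⟩ := this
    exact ⟨pairAt cs k, a, b, hlen, by rw [hlen] at hab; omega, ha, hb⟩
  · rintro ⟨p, a, b, hlen, hab, ha, hb⟩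
    have hda : a + 2 ≤ cs.length := by
      have := ha.length_le
      rw [List.length_drop, hlen] at this
      omega
    have hpa : p = pairAt cs a := by
      have := List.prefix_iff_eq_take.mp ha
      rw [hlen] at this
      exact this
    refine ⟨p, ?_, ?_⟩
    · rw [List.mem_map]
      refine ⟨((0 : Int) + (a : Int), cs.getD a ' '), ?_, ?_⟩
      · rw [List.mem_filter]
        refine ⟨(mem_enumerate_iff ' ' cs 0 _).mpr ⟨a, by omega, rfl⟩, ?_⟩
        simp only [bne_iff_ne]
        intro hc
        omega
      · rw [hpa, pairAt_eq cs a hda]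
        simp only []
        rw [show (0 : Int) + (a : Int) + 1 = ((a + 1 : Nat) : Int) by push_cast; ring,
          PySem.List.pyGetD_natCast]
    · have hne : p ≠ [] := by intro h; rw [h] at hlen; simp at hlen
      rw [decide_eq_true_eq, count_eq_gcount cs _ hne]
      have : 2 ≤ gcount p cs := (gcount_two_iff p hne cs).mpr ⟨a, b, by omega, ha, hb⟩
      omega

theorem A_iff (s : String) :
    check_new_nice_string s = true ↔ GapP s.toList ∧ PairP s.toList := by
  unfold check_new_nice_string
  simp only []
  rw [A_fold_body s.toList ((s.toList.length : Nat) : Int),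
    PySem.List.foldl_prod_mk
      (fun (r : Int) (ic : Int × Char) =>
        if ((ic.1 != (s.toList.length : Int) - 1) && (ic.1 != (s.toList.length : Int) - 2) &&
            (ic.2 == PySem.List.pyGetD s.toList (ic.1 + 2) ' ')) = true then r + 1 else r)
      (fun (p : List (List Char)) (ic : Int × Char) =>
        if (ic.1 != (s.toList.length : Int) - 1) = true
        then p ++ [[ic.2, PySem.List.pyGetD s.toList (ic.1 + 1) ' ']] else p)]
  rw [PySem.List.foldl_if_add_one, PySem.List.foldl_append_if, PySem.List.foldl_ite_add_one]
  simp only [zero_add, List.nil_append]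
  rw [ite_tf_eq_true]
  have h1 := gapCount_iff s.toList
  have h2 := pairCount_iff s.toList
  constructor
  · rintro ⟨ha, hb⟩
    exact ⟨h1.mp (by exact_mod_cast ha), h2.mp (by exact_mod_cast hb)⟩
  · rintro ⟨ha, hb⟩
    exact ⟨by exact_mod_cast h1.mpr ha, by exact_mod_cast h2.mpr hb⟩

def Bstep (cs : List Char) (st : PySem.Set (List Char) × Bool × Bool) (i : Int) :
    PySem.Set (List Char) × Bool × Bool :=
  let seen := if i ≥ 2 then st.1.add (PySem.List.slice cs (some (i - 2)) (some i)) else st.1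
  let has_pair := st.2.2 || seen.contains (PySem.List.slice cs (some i) (some (i + 2)))
  let has_gap := st.2.1 ||
    (decide (i + 2 < (cs.length : Int)) && (PySem.List.pyGetD cs i ' ' == PySem.List.pyGetD cs (i + 2) ' '))
  (seen, has_gap, has_pair)

theorem slice_pairAt (cs : List Char) (m : Nat) :
    PySem.List.slice cs (some (m : Int)) (some ((m : Int) + 2)) = pairAt cs m := by
  rw [show ((m : Int) + 2) = ((m + 2 : Nat) : Int) by push_cast; ring, PySem.List.slice_natCast]
  unfold pairAt
  congr 1
  omega

theorem slice_pairAt_sub (cs : List Char) (m : Nat) (h : 2 ≤ m) :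
    PySem.List.slice cs (some ((m : Int) - 2)) (some (m : Int)) = pairAt cs (m - 2) := by
  rw [show ((m : Int) - 2) = ((m - 2 : Nat) : Int) by push_cast [h]; ring, PySem.List.slice_natCast]
  unfold pairAt
  congr 1
  omega

theorem pyGetD_cast_add2 (cs : List Char) (m : Nat) :
    PySem.List.pyGetD cs ((m : Int) + 2) ' ' = cs.getD (m + 2) ' ' := by
  rw [show ((m : Int) + 2) = ((m + 2 : Nat) : Int) by push_cast; ring, PySem.List.pyGetD_natCast]

theorem B_inv (cs : List Char) (k : Nat) :
    (∀ q : List Char,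
      q ∈ ((PySem.List.pyRange 0 (k : Int)).foldl (Bstep cs) (PySem.Set.empty, false, false)).1 ↔
        ∃ j : Nat, j + 2 < k ∧ q = pairAt cs j) ∧
    (((PySem.List.pyRange 0 (k : Int)).foldl (Bstep cs) (PySem.Set.empty, false, false)).2.1 = true ↔
        ∃ i : Nat, i < k ∧ i + 2 < cs.length ∧ cs.getD i ' ' = cs.getD (i + 2) ' ') ∧
    (((PySem.List.pyRange 0 (k : Int)).foldl (Bstep cs) (PySem.Set.empty, false, false)).2.2 = true ↔
        ∃ a b : Nat, b < k ∧ a + 2 ≤ b ∧ pairAt cs a = pairAt cs b) := by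
  induction k with
  | zero =>
    rw [Nat.cast_zero, PySem.List.pyRange_one_eq_nil le_rfl]
    refine ⟨fun q => ?_, ?_, ?_⟩
    · simp [PySem.Set.empty]
    · simp
    · simp
  | succ k ih =>
    obtain ⟨ihS, ihG, ihP⟩ := ih
    rw [show ((k + 1 : Nat) : Int) = (k : Int) + 1 by push_cast; ring,
      PySem.List.pyRange_one_succ_right (by positivity), List.foldl_concat]
    set r := (PySem.List.pyRange 0 (k : Int)).foldl (Bstep cs) (PySem.Set.empty, false, false) with hr
    have hseen : ∀ q : List Char,
        q ∈ (Bstep cs r (k : Int)).1 ↔ ∃ j : Nat, j + 2 < k + 1 ∧ q = pairAt cs j := by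
      intro q
      unfold Bstep
      simp only []
      by_cases hk2 : (2 : Int) ≤ (k : Int)
      · rw [if_pos (by exact hk2)]
        have hk2' : 2 ≤ k := by exact_mod_cast hk2
        rw [slice_pairAt_sub cs k hk2', PySem.Set.mem_add, ihS]
        constructor
        · rintro (⟨j, hj, rfl⟩ | rfl)
          · exact ⟨j, by omega, rfl⟩
          · exact ⟨k - 2, by omega, rfl⟩
        · rintro ⟨j, hj, rfl⟩
          by_cases hjk : j = k - 2
          · subst hjk; exact Or.inr rfl
          · exact Or.inl ⟨j, by omega, rfl⟩
      · rw [if_neg (by exact hk2)]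
        have hk2' : k < 2 := by omega
        rw [ihS]
        constructor
        · rintro ⟨j, hj, rfl⟩; exact ⟨j, by omega, rfl⟩
        · rintro ⟨j, hj, rfl⟩; exact absurd hj (by omega)
    refine ⟨hseen, ?_, ?_⟩
    · have hG2 : (Bstep cs r (k : Int)).2.1 = (r.2.1 ||
          (decide ((k : Int) + 2 < (cs.length : Int)) &&
            (PySem.List.pyGetD cs (k : Int) ' ' == PySem.List.pyGetD cs ((k : Int) + 2) ' '))) := rfl
      rw [hG2, Bool.or_eq_true, ihG, PySem.List.pyGetD_natCast, pyGetD_cast_add2]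
      constructor
      · rintro (⟨i, hi, h2, h3⟩ | hnew)
        · exact ⟨i, by omega, h2, h3⟩
        · simp only [Bool.and_eq_true, decide_eq_true_eq, beq_iff_eq] at hnew
          obtain ⟨hlt, heq⟩ := hnew
          exact ⟨k, by omega, by exact_mod_cast hlt, heq⟩
      · rintro ⟨i, hi, h2, h3⟩
        by_cases hik : i = k
        · right
          simp only [Bool.and_eq_true, decide_eq_true_eq, beq_iff_eq]
          subst hik
          exact ⟨by exact_mod_cast h2, h3⟩
        · exact Or.inl ⟨i, by omega, h2, h3⟩
    · have hP2 : (Bstep cs r (k : Int)).2.2 = (r.2.2 ||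
          (Bstep cs r (k : Int)).1.contains (PySem.List.slice cs (some (k : Int)) (some ((k : Int) + 2)))) := rfl
      have hc : ((Bstep cs r (k : Int)).1.contains
          (PySem.List.slice cs (some (k : Int)) (some ((k : Int) + 2))) = true) ↔
          pairAt cs k ∈ (Bstep cs r (k : Int)).1 := by
        rw [slice_pairAt]; exact List.contains_iff_mem
      rw [hP2, Bool.or_eq_true, ihP, hc, hseen]
      constructor
      · rintro (⟨a, b, hb, hab, h⟩ | ⟨j, hj, hjk⟩)
        · exact ⟨a, b, by omega, hab, h⟩
        · exact ⟨j, k, by omega, by omega, hjk.symm⟩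
      · rintro ⟨a, b, hb, hab, h⟩
        by_cases hbk : b = k
        · subst hbk; exact Or.inr ⟨a, by omega, h.symm⟩
        · exact Or.inl ⟨a, b, by omega, hab, h⟩

theorem B_iff (s : String) :
    check_new_nice_string_alt s = true ↔ GapP s.toList ∧ PairP s.toList := by
  unfold check_new_nice_string_alt
  simp only []
  have hstep : (fun (st : PySem.Set (List Char) × Bool × Bool) (i : Int) =>
      let seen := if i ≥ 2 then st.1.add (PySem.List.slice s.toList (some (i - 2)) (some i)) else st.1
      let has_pair := st.2.2 || seen.contains (PySem.List.slice s.toList (some i) (some (i + 2)))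
      let has_gap := st.2.1 ||
        (decide (i + 2 < (s.toList.length : Int)) &&
          (PySem.List.pyGetD s.toList i ' ' == PySem.List.pyGetD s.toList (i + 2) ' '))
      (seen, has_gap, has_pair)) = Bstep s.toList := rfl
  rw [hstep]
  have hrange : ((s.toList.length : Int) - 1) = ((s.toList.length - 1 : Nat) : Int) ∨ s.toList.length = 0 := by
    cases h : s.toList.length with
    | zero => exact Or.inr rfl
    | succ m => left; push_cast [h]; omega
  have main : ∀ k : Nat,
      (((PySem.List.pyRange 0 (k : Int)).foldl (Bstep s.toList) (PySem.Set.empty, false, false)).2.1 &&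
       ((PySem.List.pyRange 0 (k : Int)).foldl (Bstep s.toList) (PySem.Set.empty, false, false)).2.2) = true ↔
      ((∃ i : Nat, i < k ∧ i + 2 < s.toList.length ∧ s.toList.getD i ' ' = s.toList.getD (i + 2) ' ') ∧
       (∃ a b : Nat, b < k ∧ a + 2 ≤ b ∧ pairAt s.toList a = pairAt s.toList b)) := by
    intro k
    obtain ⟨_, hG, hP⟩ := B_inv s.toList k
    rw [Bool.and_eq_true, hG, hP]
  rcases hrange with h | h
  · rw [h, main (s.toList.length - 1)]
    constructor
    · rintro ⟨⟨i, _, h2, h3⟩, ⟨a, b, hb, hab, hp⟩⟩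
      have hb2 : b + 2 ≤ s.toList.length := by omega
      have ha2 : a + 2 ≤ s.toList.length := by omega
      refine ⟨⟨i, by omega, h3⟩, ⟨pairAt s.toList a, a, b, pairAt_length s.toList a ha2, hab, List.take_prefix _ _, ?_⟩⟩
      rw [hp]; exact List.take_prefix _ _
    · rintro ⟨⟨i, hi, h3⟩, ⟨p, a, b, hlen, hab, hpa, hpb⟩⟩
      have hb2 : b + 2 ≤ s.toList.length := by
        have := hpb.length_le
        rw [List.length_drop, hlen] at this
        omega
      refine ⟨⟨i, by omega, by omega, h3⟩, ⟨a, b, by omega, hab, ?_⟩⟩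
      have h1 : p = pairAt s.toList a := by
        have := List.prefix_iff_eq_take.mp hpa; rwa [hlen] at this
      have h2 : p = pairAt s.toList b := by
        have := List.prefix_iff_eq_take.mp hpb; rwa [hlen] at this
      rw [← h1, ← h2]
  · rw [show ((s.toList.length : Int) - 1) = ((0 : Nat) : Int) - 1 by rw [h],
      show ((0 : Nat) : Int) - 1 = -1 by norm_num, PySem.List.pyRange_one_eq_nil (by norm_num)]
    simp only [List.foldl_nil, Bool.false_and, Bool.false_eq_true, false_iff]
    rintro ⟨⟨i, hi, _⟩, _⟩
    omega

-- ===== VERDICT (by name: the statement is the Claim_ definition above) =====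
theorem check_new_nice_string_spec : Claim_equal_check_new_nice_string := by
  intro s _
  unfold Spec_check_new_nice_string
  have hA := A_iff s
  have hB := B_iff s
  cases h1 : check_new_nice_string s <;> cases h2 : check_new_nice_string_alt s <;> simp_all
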